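-- pv_equiv track=rewrite | github.com/EnrikosIossifidis/Thesis | code/helpers/group_helpers.py | classifyoversized
-- ===== SOURCE A (Python) =====
-- def classifyoversized(syms,states):
--     classes = {}
--     for k in syms.keys():
--         if k!= 'oversized':
--             classes[k]=syms[k]
--     for s in syms['oversized']:
--         lc=len(s[0])
--         curkey = 'oversized states '+str(lc)
--         if 'oversized states '+str(lc) not in classes:
--             classes[curkey] = []
--         classes[curkey].append(s)
--     return classes
-- ===== SOURCE B (Python) =====
-- def classifyoversized(syms, states):
--     # Two staged passes: collect the distinct class names in first-appearance order,
--     # then gather each class's members with one filtering scan per class and merge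
--     # the whole group into a copy of the non-oversized entries.
--     ov = syms['oversized']
--     names = []
--     for s in ov:
--         name = 'oversized states ' + str(len(s[0]))
--         if name not in names:
--             names.append(name)
--     classes = {k: v for k, v in syms.items() if k != 'oversized'}
--     for name in names:
--         classes[name] = classes.get(name, []) + \
--             [s for s in ov if 'oversized states ' + str(len(s[0])) == name]
--     return classes
-- ===== Notes on version B (the rewrite author's own statement) =====
-- stated objective: alternative
-- what changed: A makes one interleaved pass over syms['oversized'], membership-testing and appending each symbol into the result dict; B instead first collects the distinct class names in first-appearance order, then for each name gathers its whole group with a filtering scan over the oversized list and merges the group into a copy of the non-oversized entries in one concatenation.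
import Mathlib
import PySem

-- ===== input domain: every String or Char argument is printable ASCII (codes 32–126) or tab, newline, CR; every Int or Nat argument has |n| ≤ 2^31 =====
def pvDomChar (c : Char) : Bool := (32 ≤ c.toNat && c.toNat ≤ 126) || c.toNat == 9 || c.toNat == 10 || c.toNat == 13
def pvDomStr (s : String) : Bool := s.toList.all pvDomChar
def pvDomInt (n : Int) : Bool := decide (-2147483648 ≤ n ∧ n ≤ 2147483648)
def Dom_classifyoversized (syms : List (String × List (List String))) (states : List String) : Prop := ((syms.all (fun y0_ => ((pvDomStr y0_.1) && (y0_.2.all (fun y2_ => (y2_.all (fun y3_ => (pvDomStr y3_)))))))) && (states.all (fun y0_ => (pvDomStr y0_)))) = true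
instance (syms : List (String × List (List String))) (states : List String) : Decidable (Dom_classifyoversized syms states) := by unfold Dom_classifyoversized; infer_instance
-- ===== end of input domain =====

-- B replaces A's single interleaved membership-test-and-append loop by two staged passes
-- (distinct class names first, then one gathering scan per name, merged by concatenation);
-- the equivalence proved is about the RETURN value only (Python A can mutate lists of `syms`
-- that it aliases into the result, B never mutates its argument).

-- ===== PORT A =====
-- Port note: 'classes[k] = syms[k]' with k drawn from syms.keys() copies each entry's own value
-- (Python dict keys are unique), ported as inserting the entry's value.
def classifyoversized (syms : List (String × List (List String))) (states : List String) : List (String × List (List String)) :=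
  let classes0 : PySem.Dict String (List (List String)) :=
    syms.foldl (fun c p => if p.1 ≠ "oversized" then c.insert p.1 p.2 else c) PySem.Dict.empty
  -- syms['oversized'] (KeyError when absent — excluded by Pre_)
  let ov : List (List String) := (PySem.Dict.mk syms).getD "oversized" []
  let classes := ov.foldl (fun c s =>
      -- len(s[0]) (IndexError when s is empty — excluded by Pre_)
      let lc : Int := PySem.Str.len ((PySem.List.pyGet? s 0).getD "")
      let curkey := "oversized states " ++ PySem.Int.toStr lc
      let c1 := if c.contains curkey then c else c.insert curkey []
      c1.modify curkey [] (fun l => l ++ [s])) classes0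
  classes.items

-- ===== PORT B =====
def classifyoversized_alt (syms : List (String × List (List String))) (states : List String) : List (String × List (List String)) :=
  let ov : List (List String) := (PySem.Dict.mk syms).getD "oversized" []
  -- pass 1: distinct class names in first-appearance order
  let names : List String := ov.foldl (fun ns s =>
      let name := "oversized states " ++ PySem.Int.toStr (PySem.Str.len ((PySem.List.pyGet? s 0).getD ""))
      if ns.contains name then ns else ns ++ [name]) []
  -- copy of the non-oversized entries (dict comprehension)
  let classes0 : PySem.Dict String (List (List String)) :=
    (syms.filter (fun p => p.1 ≠ "oversized")).foldl (fun c p => c.insert p.1 p.2) PySem.Dict.empty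
  -- pass 2: one gathering scan per class name, merged by concatenation
  let classes := names.foldl (fun c name =>
      c.insert name (c.getD name [] ++ ov.filter (fun s =>
        ("oversized states " ++ PySem.Int.toStr (PySem.Str.len ((PySem.List.pyGet? s 0).getD ""))) == name))) classes0
  classes.items

-- ===== PRECONDITION & SPEC =====
-- Pre_ excludes exactly the inputs where Python A raises: a missing 'oversized' key (KeyError)
-- and an empty symbol inside syms['oversized'] (IndexError on s[0]).
def Pre_classifyoversized (syms : List (String × List (List String))) (states : List String) : Prop :=
  (PySem.Dict.mk syms).contains "oversized" = true ∧
  ∀ s ∈ (PySem.Dict.mk syms).getD "oversized" [], s ≠ []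
instance (syms : List (String × List (List String))) (states : List String) : Decidable (Pre_classifyoversized syms states) := by unfold Pre_classifyoversized; infer_instance

def pvWitness_classifyoversized : (List (String × List (List String))) × List String :=
  ([("pairs", [["a", "b"]]), ("oversized", [["abc", "x"], ["z"], ["ab"]])], ["a", "b"])

def Spec_classifyoversized (syms : List (String × List (List String))) (states : List String) (out : List (String × List (List String))) : Prop := out = classifyoversized_alt syms states
instance (syms : List (String × List (List String))) (states : List String) (out : List (String × List (List String))) : Decidable (Spec_classifyoversized syms states out) := by unfold Spec_classifyoversized; infer_instance

-- ===== CLAIM (what is proved, stated in full; the proofs are below) =====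
def Claim_equal_classifyoversized : Prop := ∀ (syms : List (String × List (List String))) (states : List String), Dom_classifyoversized syms states → Pre_classifyoversized syms states → Spec_classifyoversized syms states (classifyoversized syms states)

-- ===== LEMMAS AND PROOFS =====

-- the class name of one oversized symbol
def pvKey (s : List String) : String :=
  "oversized states " ++ PySem.Int.toStr (PySem.Str.len ((PySem.List.pyGet? s 0).getD ""))

-- 'upsert-append': insert v at the end of the list stored under k (empty when k is absent)
def pvUps (c : PySem.Dict String (List (List String))) (k : String) (v : List (List String)) :
    PySem.Dict String (List (List String)) :=
  c.insert k (c.getD k [] ++ v)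

-- A's oversized loop
def pvF (ov : List (List String)) (c : PySem.Dict String (List (List String))) :
    PySem.Dict String (List (List String)) :=
  ov.foldl (fun c s => pvUps c (pvKey s) [s]) c

-- B's first pass (distinct names, first-appearance order)
def pvSeen (acc : List String) (ov : List (List String)) : List String :=
  ov.foldl (fun ns s => if ns.contains (pvKey s) then ns else ns ++ [pvKey s]) acc

-- B's second pass (per-name gather and merge)
def pvG (names : List String) (ov : List (List String))
    (c : PySem.Dict String (List (List String))) : PySem.Dict String (List (List String)) :=
  names.foldl (fun c k => pvUps c k (ov.filter (fun s => pvKey s == k))) c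

lemma pv_copy_eq (l : List (String × List (List String))) :
    ∀ c : PySem.Dict String (List (List String)),
    l.foldl (fun c p => if p.1 ≠ "oversized" then c.insert p.1 p.2 else c) c
      = (l.filter (fun p => p.1 ≠ "oversized")).foldl (fun c p => c.insert p.1 p.2) c := by
  induction l with
  | nil => intro c; rfl
  | cons p t ih =>
      intro c
      simp only [List.foldl_cons, List.filter_cons]
      by_cases h : p.1 = "oversized"
      · rw [if_neg (by simp [h]), if_neg (by simp [h])]
        exact ih c
      · rw [if_pos h, if_pos (by simp [h])]
        simp only [List.foldl_cons]
        exact ih (c.insert p.1 p.2)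

lemma pv_stepA_eq (c : PySem.Dict String (List (List String))) (k : String) (s : List String) :
    (if c.contains k then c else c.insert k []).modify k [] (fun l => l ++ [s]) = pvUps c k [s] := by
  by_cases h : c.contains k = true
  · simp [h, PySem.Dict.modify, pvUps]
  · simp only [Bool.not_eq_true] at h
    simp [h, PySem.Dict.modify, pvUps, PySem.Dict.getD_insert_self,
      PySem.Dict.insert_insert_self, PySem.Dict.getD_of_not_contains _ _ h]

lemma pv_ups_ups_self (c : PySem.Dict String (List (List String))) (k : String)
    (v w : List (List String)) : pvUps (pvUps c k v) k w = pvUps c k (v ++ w) := by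
  simp [pvUps, PySem.Dict.getD_insert_self, PySem.Dict.insert_insert_self, List.append_assoc]

lemma pv_insert_insert_comm (c : PySem.Dict String (List (List String))) (k k' : String)
    (a b : List (List String)) (hk : c.contains k = true) (hne : k' ≠ k) :
    (c.insert k a).insert k' b = (c.insert k' b).insert k a := by
  have hbeq : (k' == k) = false := by simp [hne]
  have hbeq' : (k == k') = false := by simp [Ne.symm hne]
  have hck' : (c.insert k a).contains k' = c.contains k' := by
    rw [PySem.Dict.contains_insert]; simp [hbeq]
  have hck : (c.insert k' b).contains k = true := by
    rw [PySem.Dict.contains_insert]; simp [hk]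
  by_cases h' : c.contains k' = true
  · apply PySem.Dict.ext
    rw [PySem.Dict.items_insert_of_contains _ _ (by rw [hck']; exact h'),
        PySem.Dict.items_insert_of_contains _ _ hk,
        PySem.Dict.items_insert_of_contains _ _ hck,
        PySem.Dict.items_insert_of_contains _ _ h',
        List.map_map, List.map_map]
    apply List.map_congr_left
    intro p _
    by_cases h1 : p.1 = k <;> by_cases h2 : p.1 = k' <;>
      simp [Function.comp, h1, h2, hbeq, hbeq']
  · simp only [Bool.not_eq_true] at h'
    apply PySem.Dict.ext
    rw [PySem.Dict.items_insert_of_not_contains _ _ (by rw [hck']; exact h'),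
        PySem.Dict.items_insert_of_contains _ _ hk,
        PySem.Dict.items_insert_of_contains _ _ hck,
        PySem.Dict.items_insert_of_not_contains _ _ h',
        List.map_append]
    simp [hne]

-- upserts at distinct keys commute when the earlier key is already present
lemma pv_ups_comm (c : PySem.Dict String (List (List String))) (k k0 : String)
    (s : List String) (g : List (List String)) (hk0 : c.contains k0 = true) (hne : k ≠ k0) :
    pvUps (pvUps c k [s]) k0 g = pvUps (pvUps c k0 g) k [s] := by
  unfold pvUps
  rw [PySem.Dict.getD_insert_of_ne _ _ _ (Ne.symm hne), PySem.Dict.getD_insert_of_ne _ _ _ hne]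
  exact (pv_insert_insert_comm c k0 k _ _ hk0 hne).symm

-- inserting a key's own value back is the identity (on dicts with unique keys)
lemma pv_insert_getD_self (c : PySem.Dict String (List (List String))) (k : String)
    (hnd : c.keys.Nodup) (hk : c.contains k = true) :
    c.insert k (c.getD k []) = c := by
  rcases h : c.get? k with _ | v
  · have hc : c.contains k = false := (PySem.Dict.get?_eq_none_iff_contains _ _).1 h
    simp [hc] at hk
  have hmem : (k, v) ∈ c.items := PySem.Dict.mem_items_of_get?_eq_some _ h
  have hgd : c.getD k [] = v := PySem.Dict.getD_of_mem_items _ hmem hnd []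
  apply PySem.Dict.ext
  rw [PySem.Dict.items_insert_of_contains _ _ hk]
  conv_rhs => rw [← List.map_id c.items]
  apply List.map_congr_left
  rintro ⟨p1, p2⟩ hp
  by_cases h1 : p1 = k
  · subst h1
    have hv : c.get? p1 = some p2 := PySem.Dict.get?_of_mem_items _ hp hnd
    rw [h] at hv
    have hv2 : v = p2 := Option.some.inj hv
    simp [hgd, hv2]
  · simp [h1]

-- extraction of one key's whole group to the front of A's loop
lemma pv_extract (t : List (List String)) :
    ∀ (c : PySem.Dict String (List (List String))) (k0 : String),
    c.keys.Nodup → c.contains k0 = true →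
    pvF t c = pvF (t.filter (fun s => !(pvKey s == k0)))
                  (pvUps c k0 (t.filter (fun s => pvKey s == k0))) := by
  induction t with
  | nil =>
      intro c k0 hnd hk0
      show c = pvUps c k0 []
      unfold pvUps
      rw [List.append_nil, pv_insert_getD_self c k0 hnd hk0]
  | cons s t ih =>
      intro c k0 hnd hk0
      by_cases h : pvKey s = k0
      · have hb : (pvKey s == k0) = true := by simp [h]
        have h1 : pvF (s :: t) c = pvF t (pvUps c (pvKey s) [s]) := rfl
        rw [h1, h, List.filter_cons, List.filter_cons, hb]
        simp only [Bool.not_true, if_pos, if_neg (by simp : ¬ (false = true))]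
        rw [ih (pvUps c k0 [s]) k0
              (PySem.Dict.nodup_keys_insert _ _ _ hnd)
              (PySem.Dict.contains_insert_self _ _ _),
            pv_ups_ups_self]
        rfl
      · have hb : (pvKey s == k0) = false := by simp [h]
        have h1 : pvF (s :: t) c = pvF t (pvUps c (pvKey s) [s]) := rfl
        have hk0' : (pvUps c (pvKey s) [s]).contains k0 = true := by
          unfold pvUps; rw [PySem.Dict.contains_insert]; simp [hk0]
        rw [h1, ih (pvUps c (pvKey s) [s]) k0
              (PySem.Dict.nodup_keys_insert _ _ _ hnd) hk0',
            pv_ups_comm c (pvKey s) k0 s _ hk0 h,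
            List.filter_cons, List.filter_cons, hb]
        simp only [Bool.not_false, if_pos, if_neg (by simp : ¬ (false = true))]
        rfl

lemma pv_seen_cons (acc : List String) (s : List String) (t : List (List String)) :
    pvSeen acc (s :: t)
      = pvSeen (if acc.contains (pvKey s) then acc else acc ++ [pvKey s]) t := rfl

-- pass-1 skips symbols whose name is already collected
lemma pv_seen_skip (t : List (List String)) :
    ∀ (acc : List String) (k0 : String), acc.contains k0 = true →
    pvSeen acc t = pvSeen acc (t.filter (fun s => !(pvKey s == k0))) := by
  induction t with
  | nil => intro acc k0 _; rfl
  | cons s t ih =>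
      intro acc k0 hk0
      by_cases h : pvKey s = k0
      · have hc : acc.contains (pvKey s) = true := by rw [h]; exact hk0
        rw [pv_seen_cons, if_pos hc, List.filter_cons,
          if_neg (by simp [h] : ¬ ((!(pvKey s == k0)) = true))]
        exact ih acc k0 hk0
      · have hb : (pvKey s == k0) = false := by simp [h]
        rw [List.filter_cons, if_pos (by simp [hb] : (!(pvKey s == k0)) = true), pv_seen_cons, pv_seen_cons]
        by_cases hc : acc.contains (pvKey s) = true
        · rw [if_pos hc]; exact ih acc k0 hk0
        · rw [if_neg hc]
          apply ih (acc ++ [pvKey s]) k0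
          simp only [List.contains_append, hk0, Bool.true_or]

-- an already-collected prefix whose names never recur passes through pass 1
lemma pv_seen_prefix (t : List (List String)) :
    ∀ (a b : List String), (∀ s ∈ t, pvKey s ∉ a) →
    pvSeen (a ++ b) t = a ++ pvSeen b t := by
  induction t with
  | nil => intro a b _; rfl
  | cons s t ih =>
      intro a b h
      have hs : pvKey s ∉ a := h s (by simp)
      have ha : a.contains (pvKey s) = false := by
        simpa using hs
      rw [pv_seen_cons, pv_seen_cons, List.contains_append, ha, Bool.false_or]
      by_cases hc : b.contains (pvKey s) = true
      · rw [if_pos hc, if_pos hc]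
        exact ih a b (fun x hx => h x (by simp [hx]))
      · rw [if_neg hc, if_neg hc, List.append_assoc]
        exact ih a (b ++ [pvKey s]) (fun x hx => h x (by simp [hx]))

-- every collected name comes from the accumulator or from some symbol
lemma pv_mem_seen (t : List (List String)) :
    ∀ (acc : List String) (k : String), k ∈ pvSeen acc t →
    k ∈ acc ∨ ∃ s ∈ t, pvKey s = k := by
  induction t with
  | nil => intro acc k h; exact Or.inl h
  | cons s t ih =>
      intro acc k h
      rw [pv_seen_cons] at h
      rcases ih _ k h with hm | ⟨x, hx, hk⟩
      · by_cases hc : acc.contains (pvKey s) = true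
        · rw [if_pos hc] at hm; exact Or.inl hm
        · rw [if_neg hc] at hm
          rcases List.mem_append.1 hm with hm | hm
          · exact Or.inl hm
          · exact Or.inr ⟨s, by simp, (List.mem_singleton.1 hm).symm⟩
      · exact Or.inr ⟨x, by simp [hx], hk⟩

-- MAIN: A's interleaved loop equals B's two staged passes
lemma pv_main (n : ℕ) : ∀ (ov : List (List String)) (c : PySem.Dict String (List (List String))),
    ov.length = n → c.keys.Nodup → pvF ov c = pvG (pvSeen [] ov) ov c := by
  induction n using Nat.strong_induction_on with
  | _ n ihn =>
    intro ov c hlen hnd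
    match ov with
    | [] => rfl
    | s :: t =>
      set k0 := pvKey s with hk0def
      set t' := t.filter (fun s => !(pvKey s == k0)) with ht'
      -- pass 1 on (s :: t)
      have hseen : pvSeen [] (s :: t) = k0 :: pvSeen [] t' := by
        have h1 : pvSeen [] (s :: t) = pvSeen [k0] t := by
          rw [pv_seen_cons, if_neg (by simp : ¬ (List.contains [] (pvKey s) = true))]
          rfl
        have h2 : pvSeen [k0] t = pvSeen [k0] t' := by
          rw [ht']; exact pv_seen_skip t [k0] k0 (by simp)
        have h3 : pvSeen [k0] t' = [k0] ++ pvSeen [] t' := by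
          apply pv_seen_prefix t' [k0] []
          intro x hx
          have := List.of_mem_filter hx
          simp at this
          simp [this]
        rw [h1, h2, h3]; rfl
      -- the group of k0 in (s :: t)
      have hgrp : (s :: t).filter (fun x => pvKey x == k0) = s :: t.filter (fun x => pvKey x == k0) := by
        rw [List.filter_cons, if_pos (by simp [hk0def])]
      -- other names gather identically from (s :: t) and t'
      have hother : ∀ k, k ≠ k0 →
          (s :: t).filter (fun x => pvKey x == k) = t'.filter (fun x => pvKey x == k) := by
        intro k hk
        rw [List.filter_cons, if_neg (by simp [hk0def]; exact fun h => hk h.symm), ht',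
            List.filter_filter]
        apply List.filter_congr
        intro x _
        by_cases hx : pvKey x = k
        · simp [hx, hk]
        · simp [hx]
      -- rewrite B's remaining fold over names from t'
      have hRHS : pvG (pvSeen [] (s :: t)) (s :: t) c
          = pvG (pvSeen [] t') t' (pvUps c k0 (s :: t.filter (fun x => pvKey x == k0))) := by
        rw [hseen]
        show pvG (pvSeen [] t') (s :: t) (pvUps c k0 ((s :: t).filter (fun x => pvKey x == k0)))
           = _
        rw [hgrp]
        unfold pvG
        apply PySem.List.foldl_congr_mem
        intro acc k hkmem
        have hk : k ≠ k0 := by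
          rcases pv_mem_seen t' [] k hkmem with hm | ⟨x, hx, hkx⟩
          · simp at hm
          · have := List.of_mem_filter hx
            simp at this
            rw [← hkx]; simpa using this
        rw [hother k hk]
      -- A's loop
      have hlt : t'.length < n := by
        have h1 : t'.length ≤ t.length := by
          rw [ht']; exact List.length_filter_le _ t
        have h2 : t.length + 1 = n := by simpa using hlen
        omega
      have hLHS : pvF (s :: t) c
          = pvF t' (pvUps c k0 (s :: t.filter (fun x => pvKey x == k0))) := by
        have h1 : pvF (s :: t) c = pvF t (pvUps c k0 [s]) := rfl
        rw [h1, pv_extract t (pvUps c k0 [s]) k0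
              (PySem.Dict.nodup_keys_insert _ _ _ hnd)
              (PySem.Dict.contains_insert_self _ _ _),
            pv_ups_ups_self, ← ht']
        rfl
      rw [hLHS, hRHS]
      exact ihn t'.length hlt t' _ rfl (PySem.Dict.nodup_keys_insert _ _ _ hnd)

-- ===== VERDICT (by name: the statement is the Claim_ definition above) =====
theorem classifyoversized_spec : Claim_equal_classifyoversized := by
  intro syms states _ _
  unfold Spec_classifyoversized classifyoversized classifyoversized_alt
  have hA : (fun (c : PySem.Dict String (List (List String))) (s : List String) =>
      (if c.contains ("oversized states " ++ PySem.Int.toStr (PySem.Str.len ((PySem.List.pyGet? s 0).getD ""))) then c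
       else c.insert ("oversized states " ++ PySem.Int.toStr (PySem.Str.len ((PySem.List.pyGet? s 0).getD ""))) []).modify
        ("oversized states " ++ PySem.Int.toStr (PySem.Str.len ((PySem.List.pyGet? s 0).getD ""))) [] (fun l => l ++ [s]))
      = (fun c s => pvUps c (pvKey s) [s]) := by
    funext c s; exact pv_stepA_eq c (pvKey s) s
  have hB1 : (fun (ns : List String) (s : List String) =>
      if ns.contains ("oversized states " ++ PySem.Int.toStr (PySem.Str.len ((PySem.List.pyGet? s 0).getD ""))) then ns
      else ns ++ ["oversized states " ++ PySem.Int.toStr (PySem.Str.len ((PySem.List.pyGet? s 0).getD ""))])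
      = (fun ns s => if ns.contains (pvKey s) then ns else ns ++ [pvKey s]) := rfl
  have hB2 : (fun (c : PySem.Dict String (List (List String))) (name : String) =>
      c.insert name (c.getD name [] ++ ((PySem.Dict.mk syms).getD "oversized" []).filter (fun s =>
        ("oversized states " ++ PySem.Int.toStr (PySem.Str.len ((PySem.List.pyGet? s 0).getD ""))) == name)))
      = (fun c k => pvUps c k (((PySem.Dict.mk syms).getD "oversized" []).filter (fun s => pvKey s == k))) := rfl
  simp only []
  rw [hA, hB1, hB2, pv_copy_eq]
  have hnd : ((syms.filter (fun p => p.1 ≠ "oversized")).foldl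
      (fun c p => c.insert p.1 p.2) PySem.Dict.empty).keys.Nodup := by
    exact PySem.Dict.nodup_keys_foldl_insert_key _ Prod.fst (fun _ p => p.2) _
      PySem.Dict.nodup_keys_empty
  rw [show ∀ d : PySem.Dict String (List (List String)),
        ((PySem.Dict.mk syms).getD "oversized" []).foldl (fun c s => pvUps c (pvKey s) [s]) d
        = pvF ((PySem.Dict.mk syms).getD "oversized" []) d from fun _ => rfl]
  rw [pv_main _ _ _ rfl hnd]
  rfl
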